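-- pv_equiv track=rewrite | github.com/LaurenE5/Prog-1-Project-2 | Project 2C.py | to_rle_string
-- ===== SOURCE A (Python) =====
-- def to_rle_string(rle_data):
--     rle_string = str()
--     hex_ = {1: '1', 2: '2', 3: '3', 4: '4', 5: '5', 6: '6', 7: '7', 8: '8',
--             9: '9', 10: 'a', 11: 'b', 12: 'c', 13: 'd', 14: 'e', 15: 'f'}
--
--     num_of_elements = 0
--     for character in rle_data:
--         num_of_elements += 1
--         if num_of_elements % 2 == 0:
--             rle_string += hex_[character]
--             rle_string += ':'
--         else:
--             rle_string += str(character)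
--
--     if rle_string[-1] == ':':
--         rle_string = rle_string.rstrip(rle_string[-1])
--
--     return rle_string
-- ===== SOURCE B (Python) =====
-- def to_rle_string(rle_data):
--     hex_ = {1: '1', 2: '2', 3: '3', 4: '4', 5: '5', 6: '6', 7: '7', 8: '8',
--             9: '9', 10: 'a', 11: 'b', 12: 'c', 13: 'd', 14: 'e', 15: 'f'}
--     data = list(rle_data)
--     tokens = []
--     i = 0
--     while i + 1 < len(data):
--         tokens.append(str(data[i]) + hex_[data[i + 1]])
--         i += 2
--     if i < len(data):
--         tokens.append(str(data[i]))
--     return ':'.join(tokens)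
-- ===== Notes on version B (the rewrite author's own statement) =====
-- stated objective: simpler
-- what changed: B builds the result by tokenizing the data pairwise (str(count)+hex digit per pair, a bare str(count) leftover) and ':'-joining the tokens, replacing A's element counter with parity test, incremental string concatenation and trailing-colon strip.
import Mathlib
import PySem

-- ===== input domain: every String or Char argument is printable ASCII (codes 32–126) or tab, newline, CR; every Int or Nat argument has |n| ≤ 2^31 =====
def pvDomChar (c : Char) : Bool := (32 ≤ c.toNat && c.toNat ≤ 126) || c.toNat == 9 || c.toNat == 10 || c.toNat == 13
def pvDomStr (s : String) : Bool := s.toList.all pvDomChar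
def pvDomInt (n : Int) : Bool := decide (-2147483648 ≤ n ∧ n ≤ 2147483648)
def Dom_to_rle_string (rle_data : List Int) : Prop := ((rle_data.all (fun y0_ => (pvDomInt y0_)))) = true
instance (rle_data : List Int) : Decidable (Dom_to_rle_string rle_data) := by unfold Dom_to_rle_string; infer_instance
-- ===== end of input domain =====

-- B replaces A's element counter / parity test / trailing-colon strip by pairwise tokenization
-- plus a ':'-join: a simpler decomposition of the same O(n) formatting task.


-- ===== PORT A =====
-- the hex_ dict literal (keys 1..15 → one-character strings, as List Char); A's and Source B's dicts are
-- the same literal, so the two ports share this one constant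
def hexDict : PySem.Dict Int (List Char) :=
  ⟨[(1, ['1']), (2, ['2']), (3, ['3']), (4, ['4']), (5, ['5']), (6, ['6']),
    (7, ['7']), (8, ['8']), (9, ['9']), (10, ['a']), (11, ['b']), (12, ['c']), (13, ['d']),
    (14, ['e']), (15, ['f'])]⟩

-- A's loop body: counter += 1, then append hex_[character] + ':' on even counts, str(character) on odd
-- (hex_[character] is a KeyError outside keys 1..15 — those inputs are excluded by Pre_, getD [] is never the
-- value A returns there)
def stepA (st : List Char × Int) (character : Int) : List Char × Int :=
  let n := st.2 + 1
  if PySem.Int.mod n 2 == 0 then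
    (st.1 ++ hexDict.getD character [] ++ [':'], n)
  else
    (st.1 ++ PySem.Int.toChars character, n)

-- literal port of A; rle_string[-1] on the empty string is an IndexError (excluded by Pre_, getD ' ' never
-- reached under it); rstrip(':') is ported by hand as dropWhile (· == ':') on the reverse — exact for a
-- one-character strip set
def to_rle_string (rle_data : List Int) : String :=
  let st := rle_data.foldl stepA ([], 0)
  let s := st.1
  if (PySem.List.pyGet? s (-1)).getD ' ' == ':' then
    String.ofList ((s.reverse.dropWhile (fun c => c == ':')).reverse)
  else
    String.ofList s

-- ===== PORT B =====
-- Source B's while-loop consuming two elements per step (plus the one-element leftover), as the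
-- corresponding structural recursion producing the token list
def tokensB : List Int → List (List Char)
  | [] => []
  | [a] => [PySem.Int.toChars a]
  | a :: b :: rest => (PySem.Int.toChars a ++ hexDict.getD b []) :: tokensB rest

def to_rle_string_alt (rle_data : List Int) : String :=
  String.ofList (PySem.Chars.join [':'] (tokensB rle_data))

-- ===== PRECONDITION & SPEC =====
-- Pre_ excludes exactly where A raises: the empty input (IndexError on rle_string[-1]) and inputs whose
-- elements at odd 0-based positions fall outside hex_'s keys 1..15 (KeyError)
def Pre_to_rle_string (rle_data : List Int) : Prop :=
  rle_data ≠ [] ∧ ∀ i : Fin rle_data.length, i.val % 2 = 1 → 1 ≤ rle_data[i] ∧ rle_data[i] ≤ 15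
instance (rle_data : List Int) : Decidable (Pre_to_rle_string rle_data) := by
  unfold Pre_to_rle_string; infer_instance
def pvWitness_to_rle_string : List Int := [3, 5, 2]

def Spec_to_rle_string (rle_data : List Int) (out : String) : Prop := out = to_rle_string_alt rle_data
instance (rle_data : List Int) (out : String) : Decidable (Spec_to_rle_string rle_data out) := by
  unfold Spec_to_rle_string; infer_instance

-- ===== CLAIM (what is proved, stated in full; the proofs are below) =====
def Claim_equal_to_rle_string : Prop := ∀ (rle_data : List Int), Dom_to_rle_string rle_data → Pre_to_rle_string rle_data → Spec_to_rle_string rle_data (to_rle_string rle_data)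

-- ===== LEMMAS AND PROOFS =====

-- no character of str(n), of a hex_ value, or of a token is ':'
lemma digitChar_ne_colon (m : Nat) : m.digitChar ≠ ':' := by
  by_cases h : m < 16
  · interval_cases m <;> decide
  · have e : m.digitChar = '*' := by
      simp only [Nat.digitChar,
        if_neg (by omega : ¬ m = 0), if_neg (by omega : ¬ m = 1), if_neg (by omega : ¬ m = 2),
        if_neg (by omega : ¬ m = 3), if_neg (by omega : ¬ m = 4), if_neg (by omega : ¬ m = 5),
        if_neg (by omega : ¬ m = 6), if_neg (by omega : ¬ m = 7), if_neg (by omega : ¬ m = 8),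
        if_neg (by omega : ¬ m = 9), if_neg (by omega : ¬ m = 10), if_neg (by omega : ¬ m = 11),
        if_neg (by omega : ¬ m = 12), if_neg (by omega : ¬ m = 13), if_neg (by omega : ¬ m = 14),
        if_neg (by omega : ¬ m = 15)]
    rw [e]; decide

lemma mem_toDigitsCore {c : Char} : ∀ (f n : Nat) (l : List Char),
    c ∈ Nat.toDigitsCore 10 f n l → c ∈ l ∨ ∃ m : Nat, c = m.digitChar := by
  intro f
  induction f with
  | zero => intro n l h; exact Or.inl h
  | succ f ih =>
    intro n l h
    simp only [Nat.toDigitsCore] at h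
    split at h
    · rcases List.mem_cons.mp h with h | h
      · exact Or.inr ⟨n % 10, h⟩
      · exact Or.inl h
    · rcases ih _ _ h with h | h
      · rcases List.mem_cons.mp h with h | h
        · exact Or.inr ⟨n % 10, h⟩
        · exact Or.inl h
      · exact Or.inr h

lemma toDigitsCore_ne_nil : ∀ (f n : Nat) (l : List Char), 0 < f ∨ l ≠ [] →
    Nat.toDigitsCore 10 f n l ≠ [] := by
  intro f
  induction f with
  | zero => intro n l h; simpa [Nat.toDigitsCore] using h.resolve_left (by omega)
  | succ f ih =>
    intro n l _
    simp only [Nat.toDigitsCore]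
    split
    · simp
    · exact ih _ _ (Or.inr (by simp))

lemma colon_not_mem_toChars (n : Int) : ':' ∉ PySem.Int.toChars n := by
  unfold PySem.Int.toChars Nat.toDigits
  split <;> intro h
  · rcases List.mem_cons.mp h with h | h
    · cases h
    · rcases mem_toDigitsCore _ _ _ h with h | ⟨m, h⟩
      · simp at h
      · exact digitChar_ne_colon m h.symm
  · rcases mem_toDigitsCore _ _ _ h with h | ⟨m, h⟩
    · simp at h
    · exact digitChar_ne_colon m h.symm

lemma toChars_ne_nil (n : Int) : PySem.Int.toChars n ≠ [] := by
  unfold PySem.Int.toChars Nat.toDigits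
  split
  · simp
  · exact toDigitsCore_ne_nil _ _ _ (Or.inl (by omega))

lemma colon_not_mem_hex (b : Int) : ':' ∉ hexDict.getD b [] := by
  by_cases hb : 1 ≤ b ∧ b ≤ 15
  · obtain ⟨h1, h2⟩ := hb
    interval_cases b <;> decide
  · have hk : b ∉ hexDict.keys := by
      simp only [hexDict, PySem.Dict.keys_mk]
      intro h; simp at h; omega
    rw [PySem.Dict.getD_eq_get?_getD, (PySem.Dict.get?_eq_none_iff_not_mem_keys _ _).mpr hk]
    simp

-- the string A's loop accumulates, two elements at a time
def glue : List Int → List Char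
  | [] => []
  | [a] => PySem.Int.toChars a
  | a :: b :: rest => PySem.Int.toChars a ++ hexDict.getD b [] ++ [':'] ++ glue rest

lemma stepA_even (s : List Char) (n : Int) (h : n % 2 = 0) (c : Int) :
    stepA (s, n) c = (s ++ PySem.Int.toChars c, n + 1) := by
  simp only [stepA]
  rw [PySem.Int.mod_eq_emod_of_pos (show (0:Int) < 2 by omega)]
  have h1 : (n + 1) % 2 = 1 := by omega
  simp [h1]

lemma stepA_odd (s : List Char) (n : Int) (h : n % 2 = 1) (c : Int) :
    stepA (s, n) c = (s ++ hexDict.getD c [] ++ [':'], n + 1) := by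
  simp only [stepA]
  rw [PySem.Int.mod_eq_emod_of_pos (show (0:Int) < 2 by omega)]
  have h1 : (n + 1) % 2 = 0 := by omega
  simp [h1]

lemma foldA_glue : ∀ (l : List Int) (s : List Char) (n : Int), n % 2 = 0 →
    l.foldl stepA (s, n) = (s ++ glue l, n + l.length) := by
  intro l
  induction l using glue.induct with
  | case1 => intro s n _; simp [glue]
  | case2 a => intro s n h; simp [glue, List.foldl, stepA_even s n h a]
  | case3 a b rest ih =>
    intro s n h
    have h1 : (n + 1) % 2 = 1 := by omega
    have h2 : (n + 1 + 1) % 2 = 0 := by omega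
    simp only [List.foldl, stepA_even s n h a, stepA_odd _ _ h1 b]
    rw [ih _ _ h2]
    simp only [glue, List.length_cons, Prod.mk.injEq]
    constructor
    · simp [List.append_assoc]
    · push_cast; ring

-- glue is the ':'-join of B's tokens, plus a trailing ':' exactly on even-length nonempty input
lemma join_cons_of_ne_nil (t : List Char) {ts : List (List Char)} (h : ts ≠ []) :
    PySem.Chars.join [':'] (t :: ts) = t ++ [':'] ++ PySem.Chars.join [':'] ts := by
  rcases ts with _ | ⟨u, ts⟩
  · exact absurd rfl h
  · exact PySem.Chars.join_cons_cons _ _ _ _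

lemma tokensB_ne_nil {l : List Int} (h : l ≠ []) : tokensB l ≠ [] := by
  rcases l with _ | ⟨a, _ | ⟨b, rest⟩⟩ <;> simp [tokensB] at *

lemma glue_eq_join : ∀ l : List Int,
    glue l = PySem.Chars.join [':'] (tokensB l) ++
      (if l.length % 2 = 0 ∧ l ≠ [] then [':'] else []) := by
  intro l
  induction l using glue.induct with
  | case1 => simp [glue, tokensB, PySem.Chars.join_nil]
  | case2 a => simp [glue, tokensB, PySem.Chars.join_singleton]
  | case3 a b rest ih =>
    rcases rest with _ | ⟨c, rest'⟩
    · simp [glue, tokensB, PySem.Chars.join_singleton]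
    · rw [glue, tokensB, join_cons_of_ne_nil _ (tokensB_ne_nil (by simp)), ih]
      have hmod : (a :: b :: c :: rest').length % 2 = (c :: rest').length % 2 := by
        simp only [List.length_cons]; omega
      simp only [hmod, List.append_assoc]
      simp

-- the join of B's tokens never ends in ':'
lemma last_not_colon {xs : List Char} (hne : xs ≠ []) (hmem : ':' ∉ xs) :
    ∃ c, xs.getLast? = some c ∧ c ≠ ':' := by
  refine ⟨xs.getLast hne, List.getLast?_eq_some_getLast hne, fun hc => ?_⟩
  exact hmem (hc ▸ List.getLast_mem hne)

lemma token_last {a b : Int} :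
    ∃ c, (PySem.Int.toChars a ++ hexDict.getD b []).getLast? = some c ∧ c ≠ ':' := by
  rcases hx : hexDict.getD b [] with _ | ⟨d, ds⟩
  · rw [List.append_nil]
    exact last_not_colon (toChars_ne_nil a) (colon_not_mem_toChars a)
  · rw [List.getLast?_append_of_ne_nil _ (by simp)]
    refine (last_not_colon (by simp) ?_)
    rw [← hx]; exact colon_not_mem_hex b

lemma join_last : ∀ l : List Int, l ≠ [] →
    ∃ c, (PySem.Chars.join [':'] (tokensB l)).getLast? = some c ∧ c ≠ ':' := by
  intro l
  induction l using glue.induct with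
  | case1 => intro h; exact absurd rfl h
  | case2 a =>
    intro _
    rw [tokensB, PySem.Chars.join_singleton]
    exact last_not_colon (toChars_ne_nil a) (colon_not_mem_toChars a)
  | case3 a b rest ih =>
    intro _
    rcases rest with _ | ⟨c0, rest'⟩
    · rw [tokensB, tokensB, PySem.Chars.join_singleton]
      exact token_last
    · obtain ⟨c, hc, hcne⟩ := ih (by simp)
      refine ⟨c, ?_, hcne⟩
      rw [tokensB, join_cons_of_ne_nil _ (tokensB_ne_nil (by simp)),
        List.getLast?_append_of_ne_nil _ ?_, hc]
      intro hnil
      rw [hnil] at hc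
      simp at hc

-- ===== VERDICT (by name: the statement is the Claim_ definition above) =====
theorem to_rle_string_spec : Claim_equal_to_rle_string := by
  intro l _ hpre
  obtain ⟨hne, -⟩ := hpre
  unfold Spec_to_rle_string to_rle_string to_rle_string_alt
  rw [foldA_glue l [] 0 (by decide)]
  simp only [List.nil_append]
  obtain ⟨c, hc, hcne⟩ := join_last l hne
  set J := PySem.Chars.join [':'] (tokensB l) with hJ
  by_cases hpar : l.length % 2 = 0
  · -- even length: glue l = J ++ [':'], the strip branch fires and removes exactly that colon
    have hg : glue l = J ++ [':'] := by rw [glue_eq_join l, if_pos ⟨hpar, hne⟩]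
    rw [hg, PySem.List.pyGet?_neg_one_append_singleton]
    simp only [Option.getD_some, beq_self_eq_true, if_true]
    have hJr : J.reverse = c :: (J.reverse.tail) := by
      have : J.reverse.head? = some c := by
        rw [List.head?_reverse]; exact hc
      rcases hr : J.reverse with _ | ⟨c', tl⟩
      · rw [hr] at this; cases this
      · rw [hr] at this; simp at this; simp [this]
    rw [List.reverse_append, List.reverse_singleton]
    simp only [List.singleton_append, List.dropWhile_cons, beq_self_eq_true, if_true]
    rw [hJr, List.dropWhile_cons, if_neg (by simp [hcne]), ← hJr, List.reverse_reverse]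
  · -- odd length: glue l = J, whose last character is not ':', so the branch is not taken
    have hg : glue l = J := by
      rw [glue_eq_join l, if_neg (by tauto), List.append_nil]
    rw [hg, PySem.List.pyGet?_neg_one, hc]
    simp only [Option.getD_some]
    rw [if_neg (by simp [hcne])]
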